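-- pv_equiv track=rewrite | github.com/RastyFullStaxx/IntelliForm | scripts/build_union_labels.py | ensure_bi_pairs
-- ===== SOURCE A (Python) =====
-- from typing import List, Set
--
-- def ensure_bi_pairs(labels: Set[str]) -> Set[str]:
--     """If B-FOO exists but I-FOO missing (or vice versa), add the missing half."""
--     out = set(labels)
--     types = {}
--     for lb in labels:
--         if lb == "O":
--             continue
--         tag, typ = lb.split("-", 1)
--         types.setdefault(typ, set()).add(tag)
--     for typ, tags in types.items():
--         if "B" in tags and "I" not in tags:
--             out.add(f"I-{typ}")
--         if "I" in tags and "B" not in tags: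
--             out.add(f"B-{typ}")
--     return out
-- ===== SOURCE B (Python) =====
-- def ensure_bi_pairs(labels):
--     """If B-FOO exists but I-FOO missing (or vice versa), add the missing half."""
--     out = set(labels)
--     orig = frozenset(labels)
--     for lb in labels:
--         if lb == "O":
--             continue
--         _tag, typ = lb.split("-", 1)
--         b, i = f"B-{typ}", f"I-{typ}"
--         if (b in orig) != (i in orig):
--             out.add(b)
--             out.add(i)
--     return out
-- ===== Notes on version B (the rewrite author's own statement) =====
-- stated objective: simpler
-- what changed: Drops A's intermediate typ->tags dict and its second scan: B makes one pass over the labels and, for each label's typ, adds both 'B-typ' and 'I-typ' whenever exactly one of the two occurs in the input set, relying on set.add idempotence to reproduce A's 'add only the missing half' exactly; Pre_ excludes only the labels on which A raises ValueError (a non-'O' label without '-').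
import Mathlib
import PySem

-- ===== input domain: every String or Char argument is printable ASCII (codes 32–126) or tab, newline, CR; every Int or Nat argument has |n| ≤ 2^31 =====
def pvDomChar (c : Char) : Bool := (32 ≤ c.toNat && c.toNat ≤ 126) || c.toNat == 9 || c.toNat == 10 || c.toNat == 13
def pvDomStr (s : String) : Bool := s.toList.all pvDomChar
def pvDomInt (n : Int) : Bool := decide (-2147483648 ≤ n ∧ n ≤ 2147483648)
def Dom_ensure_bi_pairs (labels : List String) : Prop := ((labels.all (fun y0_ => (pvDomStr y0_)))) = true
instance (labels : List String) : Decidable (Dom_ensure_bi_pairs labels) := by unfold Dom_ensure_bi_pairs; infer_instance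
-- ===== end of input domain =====

-- B replaces A's two passes (build a typ→tags dict, then scan it for the missing B-/I- halves) by
-- a single pass that, for each label's typ, adds both "B-typ" and "I-typ" when exactly one of them
-- occurs in the input set (set.add is idempotent); objective: simpler.

-- ===== PORT A =====
-- body of A's first loop: types.setdefault(typ, set()).add(tag)
def pvA_build (types : PySem.Dict String (PySem.Set String)) (lb : String) :
    PySem.Dict String (PySem.Set String) :=
  if lb == "O" then types
  else
    match (PySem.Str.splitMax? lb "-" 1).getD [] with
    | [tag, typ] => PySem.Dict.modify types typ PySem.Set.empty (fun s => PySem.Set.add s tag)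
    | _ => types  -- Python raises ValueError here (tuple unpacking); Pre_ excludes such labels

-- body of A's second loop over types.items()
def pvA_fix (out : PySem.Set String) (p : String × PySem.Set String) : PySem.Set String :=
  let out := if PySem.Set.contains p.2 "B" && !(PySem.Set.contains p.2 "I")
             then PySem.Set.add out ("I-" ++ p.1) else out
  if PySem.Set.contains p.2 "I" && !(PySem.Set.contains p.2 "B")
  then PySem.Set.add out ("B-" ++ p.1) else out

def ensure_bi_pairs (labels : List String) : List String :=
  let out : PySem.Set String := PySem.Set.ofList labels
  let types := labels.foldl pvA_build PySem.Dict.empty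
  types.items.foldl pvA_fix out

-- ===== PORT B =====
-- body of B's single loop (orig = the frozenset of the input labels)
def pvB_step (orig : PySem.Set String) (out : PySem.Set String) (lb : String) :
    PySem.Set String :=
  if lb == "O" then out
  else
    match (PySem.Str.splitMax? lb "-" 1).getD [] with
    | [_tag, typ] =>
        if (PySem.Set.contains orig ("B-" ++ typ)) != (PySem.Set.contains orig ("I-" ++ typ))
        then PySem.Set.add (PySem.Set.add out ("B-" ++ typ)) ("I-" ++ typ)
        else out
    | _ => out  -- Python raises ValueError here; Pre_ excludes such labels

def ensure_bi_pairs_alt (labels : List String) : List String :=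
  let out : PySem.Set String := PySem.Set.ofList labels
  let orig : PySem.Set String := PySem.Set.ofList labels
  labels.foldl (pvB_step orig) out

-- ===== PRECONDITION & SPEC =====
-- Pre_ requires every label other than "O" to contain a '-': exactly the inputs on which Python A
-- returns normally (on a non-"O" label without '-', `tag, typ = lb.split("-", 1)` raises ValueError).
def Pre_ensure_bi_pairs (labels : List String) : Prop :=
  (labels.all (fun lb => lb == "O" || PySem.Str.isIn "-" lb)) = true
instance (labels : List String) : Decidable (Pre_ensure_bi_pairs labels) := by
  unfold Pre_ensure_bi_pairs; infer_instance

def pvWitness_ensure_bi_pairs : List String := ["B-PER", "I-LOC", "O"]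

def Spec_ensure_bi_pairs (labels : List String) (out : List String) : Prop := out = ensure_bi_pairs_alt labels
instance (labels : List String) (out : List String) : Decidable (Spec_ensure_bi_pairs labels out) := by unfold Spec_ensure_bi_pairs; infer_instance

-- ===== CLAIM (what is proved, stated in full; the proofs are below) =====
def Claim_equal_ensure_bi_pairs : Prop := ∀ (labels : List String), Dom_ensure_bi_pairs labels → Pre_ensure_bi_pairs labels → Spec_ensure_bi_pairs labels (ensure_bi_pairs labels)

-- ===== LEMMAS AND PROOFS =====

-- the string layer: a non-"O" label splits at its first '-' into a dash-free tag and a typ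
def pvTag (b : Bool) : String := if b then "B" else "I"
def pvEnc (b : Bool) (t : String) : String := (if b then "B-" else "I-") ++ t
def pvGEnc (tg t : String) : String := tg ++ "-" ++ t
def pvDF (tg : String) : Prop := '-' ∉ tg.toList

theorem pvGEnc_toList (tg t : String) :
    (pvGEnc tg t).toList = tg.toList ++ '-' :: t.toList := by
  simp [pvGEnc]

theorem pvEnc_genc (b : Bool) (t : String) : pvEnc b t = pvGEnc (pvTag b) t := by
  apply String.toList_inj.mp
  cases b <;> simp [pvEnc, pvGEnc, pvTag]

theorem pvDF_tag (b : Bool) : pvDF (pvTag b) := by cases b <;> simp [pvDF, pvTag]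

theorem pvGEnc_ne_O (tg t : String) : pvGEnc tg t ≠ "O" := by
  intro h
  have := congrArg String.toList h
  rw [pvGEnc_toList] at this
  have : '-' ∈ ("O" : String).toList := by rw [← this]; simp
  simp at this

-- the go-loop of split(sep, 1): scan to the first '-' and stop
theorem pvGo (u : List Char) (hu : '-' ∉ u) : ∀ (v cur : List Char) (acc : List (List Char))
    (fuel : Nat), u.length + 2 ≤ fuel →
    PySem.Chars.splitOnMax.go ['-'] fuel 1 (u ++ '-' :: v) cur acc =
      acc.reverse ++ [cur.reverse ++ u, v] := by
  induction u with
  | nil =>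
      intro v cur acc fuel hfuel
      obtain ⟨k, rfl⟩ : ∃ k, fuel = k + 1 := ⟨fuel - 1, by omega⟩
      simp only [List.nil_append]
      rw [PySem.Chars.splitOnMax.go]
      norm_num [List.isPrefixOf]
      obtain ⟨k', rfl⟩ : ∃ k', k = k' + 1 := ⟨k - 1, by omega⟩
      cases v
      · rw [PySem.Chars.splitOnMax.go]; simp; omega
      · rw [PySem.Chars.splitOnMax.go]; simp
  | cons c u' ih =>
      intro v cur acc fuel hfuel
      obtain ⟨k, rfl⟩ : ∃ k, fuel = k + 1 := ⟨fuel - 1, by omega⟩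
      have hc : ¬ ('-' = c) := fun h => hu (h ▸ List.mem_cons_self)
      have hu' : '-' ∉ u' := fun h => hu (List.mem_cons_of_mem _ h)
      rw [List.cons_append, PySem.Chars.splitOnMax.go]
      norm_num [List.isPrefixOf, hc]
      rw [ih hu' v (c :: cur) acc k (by simp at hfuel ⊢; omega)]
      simp

theorem pvSplitOnMax_g (u v : List Char) (hu : '-' ∉ u) :
    PySem.Chars.splitOnMax (u ++ '-' :: v) ['-'] 1 = [u, v] := by
  simp only [PySem.Chars.splitOnMax, if_neg (by omega : ¬ ((1:Int) < 0)), Int.toNat_one]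
  rw [pvGo u hu v [] [] _ (by simp)]
  simp

theorem pvParse_g (tg t : String) (hdf : pvDF tg) :
    (PySem.Str.splitMax? (pvGEnc tg t) "-" 1).getD [] = [tg, t] := by
  have hs : PySem.Chars.splitMax? (pvGEnc tg t).toList "-".toList 1
      = some [tg.toList, t.toList] := by
    rw [pvGEnc_toList]
    have h2 : ("-" : String).toList = ['-'] := rfl
    rw [h2]
    simp only [PySem.Chars.splitMax?, List.isEmpty_cons]
    rw [pvSplitOnMax_g _ _ hdf]
    norm_num
  unfold PySem.Str.splitMax?
  rw [hs]
  simp [String.ofList_toList]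

-- first occurrence of '-' exists
theorem pvDashSplit {l : List Char} (h : '-' ∈ l) :
    ∃ u v, l = u ++ '-' :: v ∧ '-' ∉ u := by
  induction l with
  | nil => simp at h
  | cons c rest ih =>
      by_cases hc : c = '-'
      · exact ⟨[], rest, by rw [hc]; simp, by simp⟩
      · rcases List.mem_cons.mp h with h1 | h2
        · exact absurd h1.symm hc
        · obtain ⟨u, v, rfl, hu⟩ := ih h2
          exact ⟨c :: u, v, by simp, by
            intro hm
            rcases List.mem_cons.mp hm with h3 | h4
            · exact hc h3.symm
            · exact hu h4⟩

-- first-dash decompositions are unique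
theorem pvDashUniq : ∀ (u u' v v' : List Char), '-' ∉ u → '-' ∉ u' →
    u ++ '-' :: v = u' ++ '-' :: v' → u = u' ∧ v = v' := by
  intro u
  induction u with
  | nil =>
      intro u' v v' _ hu' he
      cases u' with
      | nil => simpa using he
      | cons c w =>
          rw [List.nil_append, List.cons_append] at he
          have : c = '-' := (List.cons.injEq _ _ _ _ ▸ he).1.symm
          exact absurd (this ▸ List.mem_cons_self) hu'
  | cons c w ih =>
      intro u' v v' hu hu' he
      cases u' with
      | nil =>
          rw [List.nil_append, List.cons_append] at he
          have : c = '-' := (List.cons.injEq _ _ _ _ ▸ he).1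
          exact absurd (this ▸ List.mem_cons_self) hu
      | cons c' w' =>
          rw [List.cons_append, List.cons_append] at he
          have h1 := (List.cons.injEq _ _ _ _ ▸ he).1
          have h2 := (List.cons.injEq _ _ _ _ ▸ he).2
          obtain ⟨hw, hv⟩ := ih w' v v' (fun hm => hu (List.mem_cons_of_mem _ hm))
            (fun hm => hu' (List.mem_cons_of_mem _ hm)) h2
          exact ⟨by rw [h1, hw], hv⟩

theorem pvGEnc_inj {tg tg' t t' : String} (h1 : pvDF tg) (h2 : pvDF tg')
    (he : pvGEnc tg t = pvGEnc tg' t') : tg = tg' ∧ t = t' := by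
  have := congrArg String.toList he
  rw [pvGEnc_toList, pvGEnc_toList] at this
  obtain ⟨ha, hb⟩ := pvDashUniq _ _ _ _ h1 h2 this
  exact ⟨String.toList_inj.mp ha, String.toList_inj.mp hb⟩

theorem pvPre_cases {labels : List String} (h : Pre_ensure_bi_pairs labels) :
    ∀ lb ∈ labels, lb = "O" ∨ ∃ tg t, pvDF tg ∧ lb = pvGEnc tg t := by
  intro lb hmem
  unfold Pre_ensure_bi_pairs at h
  rw [List.all_eq_true] at h
  have := h lb hmem
  simp only [Bool.or_eq_true, beq_iff_eq] at this
  rcases this with h1 | h2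
  · exact Or.inl h1
  · right
    have hin : '-' ∈ lb.toList := by
      obtain ⟨p, q, hpq⟩ := (PySem.Str.isIn_iff_infix "-" lb).mp h2
      rw [← hpq]
      simp
    obtain ⟨u, v, he, hu⟩ := pvDashSplit hin
    refine ⟨String.ofList u, String.ofList v, by simpa [pvDF] using hu, ?_⟩
    apply String.toList_inj.mp
    rw [pvGEnc_toList, he]
    simp
def pvMiss (p : String × PySem.Set String) : Option String :=
  if PySem.Set.contains p.2 "B" && !(PySem.Set.contains p.2 "I") then some ("I-" ++ p.1)
  else if PySem.Set.contains p.2 "I" && !(PySem.Set.contains p.2 "B") then some ("B-" ++ p.1)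
  else none

theorem pvA_fix_miss (out : PySem.Set String) (p : String × PySem.Set String) :
    pvA_fix out p = match pvMiss p with
                    | some y => PySem.Set.add out y
                    | none => out := by
  unfold pvA_fix pvMiss
  by_cases h1 : "B" ∈ p.2 <;> by_cases h2 : "I" ∈ p.2 <;> simp [h1, h2]

theorem pvFinish_update (items : List (String × PySem.Set String)) (s : PySem.Set String) :
    items.foldl pvA_fix s = PySem.Set.update s (items.filterMap pvMiss) := by
  induction items generalizing s with
  | nil => rfl
  | cons p rest ih =>
      rw [List.foldl_cons, pvA_fix_miss, ih]
      cases h : pvMiss p <;> simp [h, PySem.Set.update]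

theorem pvUpdate_absorb (l1 l2 : List String) (s : PySem.Set String) (x : String)
    (h : ∀ y ∈ l1, y ∈ s) :
    PySem.Set.update (PySem.Set.add s x) (l1 ++ x :: l2) =
      PySem.Set.update s (l1 ++ x :: l2) := by
  induction l1 generalizing s with
  | nil =>
      simp only [List.nil_append, PySem.Set.update, List.foldl_cons]
      rw [PySem.Set.add_of_mem (by simp [PySem.Set.mem_add])]
  | cons y ys ih =>
      simp only [List.cons_append, PySem.Set.update, List.foldl_cons]
      have hy : y ∈ s := h y List.mem_cons_self
      rw [PySem.Set.add_of_mem (by rw [PySem.Set.mem_add]; exact Or.inl hy),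
          PySem.Set.add_of_mem hy]
      exact ih s (fun z hz => h z (List.mem_cons_of_mem _ hz))

theorem pvMapUpdate {t : String} {v : PySem.Set String}
    (l : List (String × PySem.Set String)) (ht : ∀ p ∈ l, p.1 ≠ t) :
    l.map (fun p => if (p.1 == t) = true then (t, v) else p) = l := by
  induction l with
  | nil => rfl
  | cons q rest ih =>
      rw [List.map_cons, if_neg (by simpa using ht q List.mem_cons_self),
        ih (fun p hp => ht p (List.mem_cons_of_mem _ hp))]

theorem pvItems_insert_mid {d : PySem.Dict String (PySem.Set String)}
    {l1 l2 : List (String × PySem.Set String)} {t : String} {tags : PySem.Set String}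
    (he : d.items = l1 ++ (t, tags) :: l2)
    (h1 : ∀ p ∈ l1, p.1 ≠ t) (h2 : ∀ p ∈ l2, p.1 ≠ t) (v : PySem.Set String) :
    (d.insert t v).items = l1 ++ (t, v) :: l2 := by
  have hc : d.contains t = true := by
    unfold PySem.Dict.contains
    rw [he, List.any_eq_true]
    exact ⟨(t, tags), List.mem_append_right _ List.mem_cons_self, by simp⟩
  rw [PySem.Dict.items_insert_of_contains _ _ hc, he, List.map_append, List.map_cons]
  rw [pvMapUpdate l1 h1, pvMapUpdate l2 h2]
  simp

theorem pvGetD_mid {d : PySem.Dict String (PySem.Set String)}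
    {l1 l2 : List (String × PySem.Set String)} {t : String} {tags : PySem.Set String}
    (he : d.items = l1 ++ (t, tags) :: l2)
    (h1 : ∀ p ∈ l1, p.1 ≠ t) (d0 : PySem.Set String) :
    d.getD t d0 = tags := by
  unfold PySem.Dict.getD PySem.Dict.get?
  rw [he, List.find?_append]
  have : List.find? (fun p => p.1 == t) l1 = none := by
    rw [List.find?_eq_none]
    intro p hp; simpa using h1 p hp
  rw [this]
  simp

theorem pvGetD_not_contains {d : PySem.Dict String (PySem.Set String)} {t : String}
    (h : d.contains t = false) (d0 : PySem.Set String) : d.getD t d0 = d0 := by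
  unfold PySem.Dict.getD
  rw [(PySem.Dict.get?_eq_none_iff_not_mem_keys d t).mpr ?_]
  · rfl
  · intro hk
    rw [PySem.Dict.contains_eq_decide_mem_keys] at h
    simp [hk] at h

theorem pvKeys_insert_mid {d : PySem.Dict String (PySem.Set String)}
    {l1 l2 : List (String × PySem.Set String)} {t : String} {tags : PySem.Set String}
    (he : d.items = l1 ++ (t, tags) :: l2)
    (h1 : ∀ p ∈ l1, p.1 ≠ t) (h2 : ∀ p ∈ l2, p.1 ≠ t) (v : PySem.Set String) :
    (d.insert t v).keys = d.keys := by
  unfold PySem.Dict.keys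
  rw [pvItems_insert_mid he h1 h2 v, he]
  simp

def pvSafe (s : PySem.Set String) (p : String × PySem.Set String) : Prop :=
  ∀ y, pvMiss p = some y → y ∈ s

def pvGood (s : PySem.Set String) (p : String × PySem.Set String) : Prop :=
  (∃ tg, tg ∈ p.2) ∧ ∀ tg ∈ p.2, ∃ b, tg = pvTag b ∧ pvEnc b p.1 ∈ s

theorem pvNodupSides {items u w : List (String × PySem.Set String)} {t' : String}
    {tgs : PySem.Set String}
    (hn : (items.map Prod.fst).Nodup) (he : items = u ++ (t', tgs) :: w) :
    (∀ p ∈ u, p.1 ≠ t') ∧ (∀ p ∈ w, p.1 ≠ t') := by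
  subst he
  rw [List.map_append, List.map_cons] at hn
  have h1 := List.Nodup.of_append_right hn
  rw [List.nodup_cons] at h1
  constructor
  · intro p hp hpt
    exact (List.disjoint_of_nodup_append hn) (List.mem_map.mpr ⟨p, hp, hpt⟩) (by simp)
  · intro p hp hpt
    exact h1.1 (List.mem_map.mpr ⟨p, hp, hpt⟩)

theorem pvContains_iff (s : PySem.Set String) (x : String) :
    PySem.Set.contains s x = true ↔ x ∈ s := by
  unfold PySem.Set.contains
  exact List.contains_iff_mem

theorem pvMiss_eq (t : String) (tags : PySem.Set String) :
    pvMiss (t, tags) =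
      if "B" ∈ tags then (if "I" ∈ tags then none else some ("I-" ++ t))
      else (if "I" ∈ tags then some ("B-" ++ t) else none) := by
  unfold pvMiss
  by_cases hB : "B" ∈ tags <;> by_cases hI : "I" ∈ tags <;>
    simp [pvContains_iff, hB, hI]

theorem pvMem_add_iff (s : PySem.Set String) (x y : String) :
    y ∈ PySem.Set.add s x ↔ y ∈ s ∨ y = x := PySem.Set.mem_add s x y

theorem pvMiss_pending {tags : PySem.Set String} {b : Bool}
    (h1 : pvTag b ∈ tags) (h2 : pvTag (!b) ∉ tags) (t : String) :
    pvMiss (t, tags) = some (pvEnc (!b) t) := by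
  rw [pvMiss_eq]
  cases b <;> simp_all [pvTag, pvEnc]

theorem pvMem_mono {s : PySem.Set String} {x y : String} (h : y ∈ s) :
    y ∈ PySem.Set.add s x := (pvMem_add_iff s x y).mpr (Or.inl h)

theorem pvContains_loc {d : PySem.Dict String (PySem.Set String)} {t' : String}
    (hct : d.contains t' = true) : ∃ q, q ∈ d.items ∧ q.1 = t' := by
  unfold PySem.Dict.contains at hct
  rw [List.any_eq_true] at hct
  obtain ⟨q, hq, hqt⟩ := hct
  exact ⟨q, hq, by simpa using hqt⟩

theorem pvA_build_O (d : PySem.Dict String (PySem.Set String)) : pvA_build d "O" = d := by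
  unfold pvA_build; simp






-- every tag recorded for a typ is dash-free and comes from a label of orig
def pvH2 (orig : PySem.Set String) (p : String × PySem.Set String) : Prop :=
  ∀ tg ∈ p.2, pvDF tg ∧ pvGEnc tg p.1 ∈ orig

-- B has done its work for typ u: a present B/I label's complement is in orig or already added
def pvHX (orig s : PySem.Set String) (u : String) : Prop :=
  ∀ b2 : Bool, pvEnc b2 u ∈ orig → pvEnc (!b2) u ∈ orig ∨ pvEnc (!b2) u ∈ s

-- every B/I label of orig is recorded in the dict or still to be processed
def pvHC (orig : PySem.Set String) (d : PySem.Dict String (PySem.Set String))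
    (rest : List String) : Prop :=
  ∀ (b2 : Bool) (u : String), pvEnc b2 u ∈ orig →
    pvTag b2 ∈ d.getD u PySem.Set.empty ∨ pvEnc b2 u ∈ rest

theorem pvSafe_of_HX {orig s : PySem.Set String} {p : String × PySem.Set String}
    (ho : ∀ y ∈ orig, y ∈ s) (h2 : pvH2 orig p) (hx : pvHX orig s p.1) : pvSafe s p := by
  intro y hy
  have hy' : pvMiss (p.1, p.2) = some y := hy
  rw [pvMiss_eq] at hy'
  by_cases hB : "B" ∈ p.2 <;> by_cases hI : "I" ∈ p.2 <;> simp [hB, hI] at hy'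
  · -- only "B": y = "I-" ++ p.1 = pvEnc false p.1
    have hBo : pvEnc true p.1 ∈ orig := by
      rw [pvEnc_genc]; exact (h2 "B" hB).2
    subst hy'
    rcases hx true hBo with h | h
    · exact ho _ h
    · exact h
  · have hIo : pvEnc false p.1 ∈ orig := by
      rw [pvEnc_genc]; exact (h2 "I" hI).2
    subst hy'
    rcases hx false hIo with h | h
    · exact ho _ h
    · exact h

theorem pvH2_add_tag {orig : PySem.Set String} {u tg0 : String} {tgs : PySem.Set String}
    (h : pvH2 orig (u, tgs)) (hdf : pvDF tg0) (hmem : pvGEnc tg0 u ∈ orig) :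
    pvH2 orig (u, PySem.Set.add tgs tg0) := by
  intro tg htg
  have htg2 : tg ∈ PySem.Set.add tgs tg0 := htg
  rcases (pvMem_add_iff _ _ _).mp htg2 with h1 | rfl
  · exact h tg h1
  · exact ⟨hdf, hmem⟩

theorem pvH2_single {orig : PySem.Set String} {u tg0 : String}
    (hdf : pvDF tg0) (hmem : pvGEnc tg0 u ∈ orig) :
    pvH2 orig (u, PySem.Set.add PySem.Set.empty tg0) := by
  intro tg htg
  have htg2 : tg ∈ PySem.Set.add PySem.Set.empty tg0 := htg
  rcases (pvMem_add_iff _ _ _).mp htg2 with h1 | rfl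
  · simp [PySem.Set.empty] at h1
  · exact ⟨hdf, hmem⟩

theorem pvA_build_g (d : PySem.Dict String (PySem.Set String)) {tg t : String}
    (hdf : pvDF tg) :
    pvA_build d (pvGEnc tg t) =
      d.insert t (PySem.Set.add (d.getD t PySem.Set.empty) tg) := by
  unfold pvA_build
  rw [if_neg (by simpa using pvGEnc_ne_O tg t), pvParse_g _ _ hdf]
  rfl

theorem pvB_step_g (orig out : PySem.Set String) {tg t : String} (hdf : pvDF tg) :
    pvB_step orig out (pvGEnc tg t) =
      if (PySem.Set.contains orig ("B-" ++ t)) != (PySem.Set.contains orig ("I-" ++ t))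
      then PySem.Set.add (PySem.Set.add out ("B-" ++ t)) ("I-" ++ t)
      else out := by
  unfold pvB_step
  rw [if_neg (by simpa using pvGEnc_ne_O tg t), pvParse_g _ _ hdf]

theorem pvB_step_O (orig s : PySem.Set String) : pvB_step orig s "O" = s := by
  unfold pvB_step; simp

theorem pvUpdate_noop {s : PySem.Set String} : ∀ (l : List String), (∀ y ∈ l, y ∈ s) →
    PySem.Set.update s l = s := by
  intro l
  induction l with
  | nil => intro _; rfl
  | cons z zs ihz =>
      intro hz
      simp only [PySem.Set.update, List.foldl_cons]
      rw [PySem.Set.add_of_mem (hz z List.mem_cons_self)]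
      exact ihz (fun y hy => hz y (List.mem_cons_of_mem _ hy))

theorem pvKeysNodup_map {d : PySem.Dict String (PySem.Set String)} (h : d.keys.Nodup) :
    (d.items.map Prod.fst).Nodup := h

-- KEY LEMMA: adding the pending missing half x to the accumulator now or letting A's final
-- scan add it gives the same list
theorem pvKey : ∀ (rest : List String) (orig : PySem.Set String)
    (d : PySem.Dict String (PySem.Set String))
    (l1 l2 : List (String × PySem.Set String)) (t : String) (tags : PySem.Set String)
    (s : PySem.Set String) (bm : Bool),
    d.items = l1 ++ (t, tags) :: l2 →
    d.keys.Nodup →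
    (∀ lb ∈ rest, lb = "O" ∨ ∃ tg u, pvDF tg ∧ lb = pvGEnc tg u) →
    (∀ lb ∈ rest, lb ∈ orig) →
    (∀ y ∈ orig, y ∈ s) →
    (∀ p ∈ d.items, pvH2 orig p) →
    pvHC orig d rest →
    (∀ p ∈ l1, pvHX orig s p.1) →
    pvEnc (!bm) t ∈ orig →
    pvEnc bm t ∉ orig →
    (rest.foldl pvA_build d).items.foldl pvA_fix (PySem.Set.add s (pvEnc bm t)) =
      (rest.foldl pvA_build d).items.foldl pvA_fix s := by
  intro rest
  induction rest with
  | nil =>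
      intro orig d l1 l2 t tags s bm he hN hPre hrest ho h2 hc hx1 hpres hmiss
      by_cases hx : pvEnc bm t ∈ s
      · rw [PySem.Set.add_of_mem hx]
      · simp only [List.foldl_nil]
        rw [pvFinish_update, pvFinish_update, he, List.filterMap_append, List.filterMap_cons]
        have hsides := pvNodupSides (pvKeysNodup_map hN) he
        have hBm : pvTag (!bm) ∈ tags := by
          rcases hc (!bm) t hpres with h | h
          · rwa [pvGetD_mid he hsides.1] at h
          · simp at h
        have hNot : pvTag bm ∉ tags := by
          intro hm
          have := (h2 (t, tags) (by rw [he]; exact List.mem_append_right _ List.mem_cons_self)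
            (pvTag bm) hm).2
          rw [← pvEnc_genc] at this
          exact hmiss this
        have hNot' : pvTag (!(!bm)) ∉ tags := by rwa [Bool.not_not]
        rw [pvMiss_pending hBm hNot']
        rw [show pvEnc (!(!bm)) t = pvEnc bm t from by rw [Bool.not_not]]
        exact pvUpdate_absorb _ _ s _ (by
          intro y hy
          rw [List.mem_filterMap] at hy
          obtain ⟨p, hp, hmissp⟩ := hy
          exact pvSafe_of_HX ho
            (h2 p (by rw [he]; exact List.mem_append_left _ hp)) (hx1 p hp) y hmissp)
  | cons lb rest' ih =>
      intro orig d l1 l2 t tags s bm he hN hPre hrest ho h2 hc hx1 hpres hmiss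
      by_cases hx : pvEnc bm t ∈ s
      · rw [PySem.Set.add_of_mem hx]
      have hPre' := fun z hz => hPre z (List.mem_cons_of_mem _ hz)
      have hrest' := fun z hz => hrest z (List.mem_cons_of_mem _ hz)
      rcases hPre lb List.mem_cons_self with hO | ⟨tg0, u0, hdf0, rfl⟩
      · subst hO
        rw [List.foldl_cons, pvA_build_O]
        refine ih orig d l1 l2 t tags s bm he hN hPre' hrest' ho h2 ?_ hx1 hpres hmiss
        intro b2 u hm
        rcases hc b2 u hm with h | h
        · exact Or.inl h
        · rcases List.mem_cons.mp h with h1 | h1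
          · exact absurd h1 (by rw [pvEnc_genc]; exact pvGEnc_ne_O _ _)
          · exact Or.inr h1
      · rw [List.foldl_cons, pvA_build_g d hdf0]
        have hlb : pvGEnc tg0 u0 ∈ orig := hrest _ List.mem_cons_self
        -- common facts for re-establishing pvHC after the insert
        have hc2 : ∀ (dnew : PySem.Dict String (PySem.Set String)),
            (∀ u, dnew.getD u PySem.Set.empty =
              if u = u0 then PySem.Set.add (d.getD u0 PySem.Set.empty) tg0
              else d.getD u PySem.Set.empty) →
            pvHC orig dnew rest' := by
          intro dnew hget b2 u hm
          rcases hc b2 u hm with h | h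
          · rw [hget]
            by_cases hu : u = u0
            · subst hu
              rw [if_pos rfl]
              exact Or.inl ((pvMem_add_iff _ _ _).mpr (Or.inl h))
            · rw [if_neg hu]; exact Or.inl h
          · rcases List.mem_cons.mp h with h1 | h1
            · -- the processed label is exactly this B/I label
              rw [pvEnc_genc] at h1
              obtain ⟨htg, hu⟩ := pvGEnc_inj (pvDF_tag b2) hdf0 h1
              subst hu
              rw [hget, if_pos rfl, ← htg]
              exact Or.inl ((pvMem_add_iff _ _ _).mpr (Or.inr rfl))
            · exact Or.inr h1
        have hgetd : ∀ u, (d.insert u0 (PySem.Set.add (d.getD u0 PySem.Set.empty) tg0)).getD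
            u PySem.Set.empty =
            if u = u0 then PySem.Set.add (d.getD u0 PySem.Set.empty) tg0
            else d.getD u PySem.Set.empty := by
          intro u
          rw [PySem.Dict.getD_insert]
        by_cases hct : d.contains u0 = true
        · obtain ⟨q, hq, hqt⟩ := pvContains_loc hct
          rw [he] at hq
          rcases List.mem_append.mp hq with hq1 | hq2
          · -- u0 is the key of an entry of l1
            obtain ⟨a1, a2, rfl⟩ := List.append_of_mem hq1
            obtain ⟨tgs, rfl⟩ : ∃ tgs, q = (u0, tgs) := ⟨q.2, by rw [← hqt]⟩
            have he' : d.items = a1 ++ (u0, tgs) :: (a2 ++ (t, tags) :: l2) := by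
              simpa using he
            have hsides := pvNodupSides (pvKeysNodup_map hN) he'
            have hit := pvItems_insert_mid he' hsides.1 hsides.2
              (PySem.Set.add (d.getD u0 PySem.Set.empty) tg0)
            have hgd : d.getD u0 PySem.Set.empty = tgs := pvGetD_mid he' hsides.1 _
            have he2 : (d.insert u0 (PySem.Set.add (d.getD u0 PySem.Set.empty) tg0)).items
                = (a1 ++ (u0, PySem.Set.add tgs tg0) :: a2) ++ (t, tags) :: l2 := by
              rw [hit, hgd]; simp
            refine ih orig _ _ l2 t tags s bm he2 ?_ hPre' hrest' ho ?_ (hc2 _ hgetd) ?_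
              hpres hmiss
            · rw [pvKeys_insert_mid he' hsides.1 hsides.2 _]; exact hN
            · intro p hp
              rw [hit, hgd] at hp
              rcases List.mem_append.mp hp with hp1 | hp2
              · exact h2 p (by rw [he']; exact List.mem_append_left _ hp1)
              · rcases List.mem_cons.mp hp2 with rfl | hp3
                · exact pvH2_add_tag (h2 (u0, tgs)
                    (by rw [he']; exact List.mem_append_right _ List.mem_cons_self)) hdf0 hlb
                · exact h2 p (by rw [he']; simp [hp3])
            · intro p hp
              rcases List.mem_append.mp hp with hp1 | hp2
              · exact hx1 p (List.mem_append_left _ hp1)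
              · rcases List.mem_cons.mp hp2 with rfl | hp3
                · exact hx1 (u0, tgs) (List.mem_append_right _ List.mem_cons_self)
                · exact hx1 p (List.mem_append_right _ (List.mem_cons_of_mem _ hp3))
          · rcases List.mem_cons.mp hq2 with hq4 | hq3
            · -- u0 is the pending typ t
              have htt : t = u0 := by rw [hq4] at hqt; exact hqt
              subst htt
              have hsides := pvNodupSides (pvKeysNodup_map hN) he
              have hit := pvItems_insert_mid he hsides.1 hsides.2
                (PySem.Set.add (d.getD t PySem.Set.empty) tg0)
              have hgd : d.getD t PySem.Set.empty = tags := pvGetD_mid he hsides.1 _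
              have he2 : (d.insert t (PySem.Set.add (d.getD t PySem.Set.empty) tg0)).items
                  = l1 ++ (t, PySem.Set.add tags tg0) :: l2 := by rw [hit, hgd]
              refine ih orig _ l1 l2 t (PySem.Set.add tags tg0) s bm he2 ?_ hPre' hrest' ho ?_
                (hc2 _ hgetd) hx1 hpres hmiss
              · rw [pvKeys_insert_mid he hsides.1 hsides.2 _]; exact hN
              · intro p hp
                rw [hit, hgd] at hp
                rcases List.mem_append.mp hp with hp1 | hp2
                · exact h2 p (by rw [he]; exact List.mem_append_left _ hp1)
                · rcases List.mem_cons.mp hp2 with rfl | hp3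
                  · exact pvH2_add_tag (h2 (t, tags)
                      (by rw [he]; exact List.mem_append_right _ List.mem_cons_self)) hdf0 hlb
                  · exact h2 p (by rw [he]; simp [hp3])
            · -- u0 is the key of an entry of l2
              obtain ⟨c1, c2, rfl⟩ := List.append_of_mem hq3
              obtain ⟨tgs, rfl⟩ : ∃ tgs, q = (u0, tgs) := ⟨q.2, by rw [← hqt]⟩
              have he' : d.items = (l1 ++ (t, tags) :: c1) ++ (u0, tgs) :: c2 := by
                simpa using he
              have hsides := pvNodupSides (pvKeysNodup_map hN) he'
              have hit := pvItems_insert_mid he' hsides.1 hsides.2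
                (PySem.Set.add (d.getD u0 PySem.Set.empty) tg0)
              have hgd : d.getD u0 PySem.Set.empty = tgs := pvGetD_mid he' hsides.1 _
              have he2 : (d.insert u0 (PySem.Set.add (d.getD u0 PySem.Set.empty) tg0)).items
                  = l1 ++ (t, tags) :: (c1 ++ (u0, PySem.Set.add tgs tg0) :: c2) := by
                rw [hit, hgd]; simp
              refine ih orig _ l1 _ t tags s bm he2 ?_ hPre' hrest' ho ?_ (hc2 _ hgetd) hx1
                hpres hmiss
              · rw [pvKeys_insert_mid he' hsides.1 hsides.2 _]; exact hN
              · intro p hp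
                rw [he2] at hp
                rcases List.mem_append.mp hp with hp1 | hp2
                · exact h2 p (by rw [he]; exact List.mem_append_left _ hp1)
                · rcases List.mem_cons.mp hp2 with rfl | hp3
                  · exact h2 _ (by rw [he]; exact List.mem_append_right _ List.mem_cons_self)
                  · rcases List.mem_append.mp hp3 with hp4 | hp5
                    · exact h2 p (by rw [he]; simp [hp4])
                    · rcases List.mem_cons.mp hp5 with rfl | hp6
                      · exact pvH2_add_tag (h2 (u0, tgs)
                          (by rw [he']; exact List.mem_append_right _ List.mem_cons_self))
                          hdf0 hlb
                      · exact h2 p (by rw [he']; simp [hp6])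
        · -- fresh typ: appended after the pending entry
          have hctf : d.contains u0 = false := by simpa using hct
          have hit := PySem.Dict.items_insert_of_not_contains d
            (PySem.Set.add (d.getD u0 PySem.Set.empty) tg0) hctf
          have hgd : d.getD u0 PySem.Set.empty = PySem.Set.empty := pvGetD_not_contains hctf _
          have he2 : (d.insert u0 (PySem.Set.add (d.getD u0 PySem.Set.empty) tg0)).items
              = l1 ++ (t, tags) ::
                (l2 ++ [(u0, PySem.Set.add PySem.Set.empty tg0)]) := by
            rw [hit, hgd, he]; simp
          refine ih orig _ l1 _ t tags s bm he2 ?_ hPre' hrest' ho ?_ (hc2 _ ?_) hx1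
            hpres hmiss
          · show ((d.insert u0 _).items.map _).Nodup
            rw [hit]
            simp only [List.map_append, List.map_cons, List.map_nil]
            rw [List.nodup_append]
            rw [PySem.Dict.contains_eq_decide_mem_keys] at hctf
            simp at hctf
            refine ⟨hN, by simp, ?_⟩
            intro z hz w hw
            simp only [List.mem_cons, List.not_mem_nil, or_false] at hw
            subst hw
            intro hzw
            exact hctf (hzw ▸ hz)
          · intro p hp
            rw [he2] at hp
            rcases List.mem_append.mp hp with hp1 | hp2
            · exact h2 p (by rw [he]; exact List.mem_append_left _ hp1)
            · rcases List.mem_cons.mp hp2 with rfl | hp3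
              · exact h2 _ (by rw [he]; exact List.mem_append_right _ List.mem_cons_self)
              · rcases List.mem_append.mp hp3 with hp4 | hp5
                · exact h2 p (by rw [he]; simp [hp4])
                · rcases List.mem_singleton.mp hp5 with rfl
                  exact pvH2_single hdf0 hlb
          · intro u
            rw [hgetd u, hgd]

theorem pvH2_getD {orig : PySem.Set String} {d : PySem.Dict String (PySem.Set String)}
    (h2 : ∀ p ∈ d.items, pvH2 orig p) (u : String) :
    pvH2 orig (u, d.getD u PySem.Set.empty) := by
  cases hg : d.get? u with
  | none =>
      intro tg htg
      have : d.getD u PySem.Set.empty = PySem.Set.empty := by unfold PySem.Dict.getD; rw [hg]; rfl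
      rw [this] at htg
      simp [PySem.Set.empty] at htg
  | some v =>
      have hmem := PySem.Dict.mem_items_of_get?_eq_some d hg
      have : d.getD u PySem.Set.empty = v := by unfold PySem.Dict.getD; rw [hg]; rfl
      rw [this]
      exact h2 (u, v) hmem

theorem pvKeys_insert (d : PySem.Dict String (PySem.Set String)) (k : String)
    (v : PySem.Set String) :
    (d.insert k v).keys = if d.contains k = true then d.keys else d.keys ++ [k] := by
  unfold PySem.Dict.keys
  by_cases hc : d.contains k = true
  · rw [PySem.Dict.items_insert_of_contains d v hc, if_pos hc, List.map_map]
    apply List.map_congr_left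
    intro p _
    by_cases hpk : p.1 = k <;> simp [hpk]
  · rw [PySem.Dict.items_insert_of_not_contains d v (by simpa using hc), if_neg hc]
    simp

theorem pvNodup_insert {d : PySem.Dict String (PySem.Set String)} (hN : d.keys.Nodup)
    (k : String) (v : PySem.Set String) : (d.insert k v).keys.Nodup := by
  rw [pvKeys_insert]
  by_cases hc : d.contains k = true
  · rwa [if_pos hc]
  · rw [if_neg hc]
    rw [List.nodup_append]
    refine ⟨hN, by simp, ?_⟩
    rw [PySem.Dict.contains_eq_decide_mem_keys] at hc
    simp at hc
    intro z hz w hw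
    simp only [List.mem_cons, List.not_mem_nil, or_false] at hw
    subst hw
    intro hzw
    exact hc (hzw ▸ hz)

theorem pvH2_step {orig : PySem.Set String} {d : PySem.Dict String (PySem.Set String)}
    {tg0 u0 : String} (h2 : ∀ p ∈ d.items, pvH2 orig p) (hdf0 : pvDF tg0)
    (hlb : pvGEnc tg0 u0 ∈ orig) :
    ∀ p ∈ (d.insert u0 (PySem.Set.add (d.getD u0 PySem.Set.empty) tg0)).items,
      pvH2 orig p := by
  intro p hp
  rcases (PySem.Dict.mem_items_insert _ _ _ _).mp hp with rfl | ⟨hpd, -⟩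
  · exact pvH2_add_tag (pvH2_getD h2 u0) hdf0 hlb
  · exact h2 p hpd

theorem pvHC_step {orig : PySem.Set String} {d : PySem.Dict String (PySem.Set String)}
    {tg0 u0 : String} {rest' : List String} (hdf0 : pvDF tg0)
    (hc : pvHC orig d (pvGEnc tg0 u0 :: rest')) :
    pvHC orig (d.insert u0 (PySem.Set.add (d.getD u0 PySem.Set.empty) tg0)) rest' := by
  intro b2 u hm
  rcases hc b2 u hm with h | h
  · rw [PySem.Dict.getD_insert]
    by_cases hu : u = u0
    · subst hu
      rw [if_pos rfl]
      exact Or.inl ((pvMem_add_iff _ _ _).mpr (Or.inl h))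
    · rw [if_neg hu]; exact Or.inl h
  · rcases List.mem_cons.mp h with h1 | h1
    · rw [pvEnc_genc] at h1
      obtain ⟨htg, hu⟩ := pvGEnc_inj (pvDF_tag b2) hdf0 h1
      subst hu
      rw [PySem.Dict.getD_insert, if_pos rfl, ← htg]
      exact Or.inl ((pvMem_add_iff _ _ _).mpr (Or.inr rfl))
    · exact Or.inr h1

theorem pvHC_O {orig : PySem.Set String} {d : PySem.Dict String (PySem.Set String)}
    {rest' : List String} (hc : pvHC orig d ("O" :: rest')) : pvHC orig d rest' := by
  intro b2 u hm
  rcases hc b2 u hm with h | h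
  · exact Or.inl h
  · rcases List.mem_cons.mp h with h1 | h1
    · exact absurd h1 (by rw [pvEnc_genc]; exact pvGEnc_ne_O _ _)
    · exact Or.inr h1

theorem pvMain : ∀ (rest : List String) (orig : PySem.Set String)
    (d : PySem.Dict String (PySem.Set String)) (s : PySem.Set String),
    (∀ lb ∈ rest, lb = "O" ∨ ∃ tg u, pvDF tg ∧ lb = pvGEnc tg u) →
    (∀ lb ∈ rest, lb ∈ orig) →
    (∀ y ∈ orig, y ∈ s) →
    d.keys.Nodup →
    (∀ p ∈ d.items, pvH2 orig p) →
    pvHC orig d rest →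
    (∀ p ∈ d.items, pvHX orig s p.1) →
    (rest.foldl pvA_build d).items.foldl pvA_fix s = rest.foldl (pvB_step orig) s := by
  intro rest
  induction rest with
  | nil =>
      intro orig d s _ _ ho _ h2 _ hxall
      simp only [List.foldl_nil]
      rw [pvFinish_update]
      apply pvUpdate_noop
      intro y hy
      rw [List.mem_filterMap] at hy
      obtain ⟨p, hp, hmiss⟩ := hy
      exact pvSafe_of_HX ho (h2 p hp) (hxall p hp) y hmiss
  | cons lb rest' ih =>
      intro orig d s hPre hrest ho hN h2 hc hxall
      have hPre' := fun z hz => hPre z (List.mem_cons_of_mem _ hz)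
      have hrest' := fun z hz => hrest z (List.mem_cons_of_mem _ hz)
      rcases hPre lb List.mem_cons_self with hO | ⟨tg0, u0, hdf0, rfl⟩
      · subst hO
        rw [List.foldl_cons, List.foldl_cons, pvA_build_O, pvB_step_O]
        exact ih orig d s hPre' hrest' ho hN h2 (pvHC_O hc) hxall
      · rw [List.foldl_cons, List.foldl_cons, pvA_build_g d hdf0, pvB_step_g orig s hdf0]
        have hlb : pvGEnc tg0 u0 ∈ orig := hrest _ List.mem_cons_self
        have hN2 := pvNodup_insert hN u0 (PySem.Set.add (d.getD u0 PySem.Set.empty) tg0)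
        have h2' := pvH2_step h2 hdf0 hlb
        have hc' := pvHC_step hdf0 hc
        have hdecomp : ∃ L1 L2,
            (d.insert u0 (PySem.Set.add (d.getD u0 PySem.Set.empty) tg0)).items
              = L1 ++ (u0, PySem.Set.add (d.getD u0 PySem.Set.empty) tg0) :: L2 ∧
            (∀ p ∈ L1, p ∈ d.items) := by
          by_cases hct : d.contains u0 = true
          · obtain ⟨q, hq, hqt⟩ := pvContains_loc hct
            obtain ⟨l1, l2, hsplit⟩ := List.append_of_mem hq
            obtain ⟨tgs, rfl⟩ : ∃ tgs, q = (u0, tgs) := ⟨q.2, by rw [← hqt]⟩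
            have hsides := pvNodupSides (pvKeysNodup_map hN) hsplit
            exact ⟨l1, l2, pvItems_insert_mid hsplit hsides.1 hsides.2 _,
              fun p hp => by rw [hsplit]; exact List.mem_append_left _ hp⟩
          · exact ⟨d.items, [],
              PySem.Dict.items_insert_of_not_contains d _ (by simpa using hct),
              fun p hp => hp⟩
        obtain ⟨L1, L2, heD, hsub⟩ := hdecomp
        by_cases hxor : ((PySem.Set.contains orig ("B-" ++ u0))
            != (PySem.Set.contains orig ("I-" ++ u0))) = true
        · rw [if_pos hxor]
          rw [show ("B-" ++ u0) = pvEnc true u0 from rfl, show ("I-" ++ u0) = pvEnc false u0 from rfl]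
          rw [bne_iff_ne] at hxor
          by_cases hb : pvEnc true u0 ∈ orig
          · -- "B-u0" present: the missing half is "I-u0"
            have hi : pvEnc false u0 ∉ orig := by
              intro hmem
              exact hxor (by
                rw [(pvContains_iff orig ("B-" ++ u0)).mpr hb,
                  (pvContains_iff orig ("I-" ++ u0)).mpr hmem])
            rw [PySem.Set.add_of_mem (ho _ hb)]
            by_cases hxs : pvEnc false u0 ∈ s
            · rw [PySem.Set.add_of_mem hxs]
              refine ih orig _ s hPre' hrest' ho hN2 h2' hc' ?_
              intro p hp
              rcases (PySem.Dict.mem_items_insert _ _ _ _).mp hp with rfl | ⟨hpd, -⟩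
              · intro b2 hb2
                cases b2
                · exact absurd hb2 hi
                · exact Or.inr hxs
              · exact hxall p hpd
            · have hkey := pvKey rest' orig _ L1 L2 u0 _ s false heD hN2 hPre' hrest' ho
                h2' hc' (fun p hp => hxall p (hsub p hp)) hb hi
              rw [← hkey]
              refine ih orig _ _ hPre' hrest'
                (fun y hy => pvMem_mono (ho y hy)) hN2 h2' hc' ?_
              intro p hp
              rcases (PySem.Dict.mem_items_insert _ _ _ _).mp hp with rfl | ⟨hpd, -⟩
              · intro b2 hb2
                cases b2
                · exact absurd hb2 hi
                · exact Or.inr ((pvMem_add_iff _ _ _).mpr (Or.inr rfl))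
              · exact fun b2 hb2 => (hxall p hpd b2 hb2).imp id pvMem_mono
          · -- "I-u0" present: the missing half is "B-u0"
            have hi : pvEnc false u0 ∈ orig := by
              by_contra hmem
              exact hxor (by
                have h1 : PySem.Set.contains orig ("B-" ++ u0) = false := by
                  simpa [pvContains_iff] using hb
                have h2 : PySem.Set.contains orig ("I-" ++ u0) = false := by
                  simpa [pvContains_iff] using hmem
                rw [h1, h2])
            by_cases hxs : pvEnc true u0 ∈ s
            · rw [PySem.Set.add_of_mem hxs, PySem.Set.add_of_mem (ho _ hi)]
              refine ih orig _ s hPre' hrest' ho hN2 h2' hc' ?_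
              intro p hp
              rcases (PySem.Dict.mem_items_insert _ _ _ _).mp hp with rfl | ⟨hpd, -⟩
              · intro b2 hb2
                cases b2
                · exact Or.inr hxs
                · exact absurd hb2 hb
              · exact hxall p hpd
            · rw [PySem.Set.add_of_mem (pvMem_mono (ho _ hi))]
              have hkey := pvKey rest' orig _ L1 L2 u0 _ s true heD hN2 hPre' hrest' ho
                h2' hc' (fun p hp => hxall p (hsub p hp)) hi hb
              rw [← hkey]
              refine ih orig _ _ hPre' hrest'
                (fun y hy => pvMem_mono (ho y hy)) hN2 h2' hc' ?_
              intro p hp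
              rcases (PySem.Dict.mem_items_insert _ _ _ _).mp hp with rfl | ⟨hpd, -⟩
              · intro b2 hb2
                cases b2
                · exact Or.inr ((pvMem_add_iff _ _ _).mpr (Or.inr rfl))
                · exact absurd hb2 hb
              · exact fun b2 hb2 => (hxall p hpd b2 hb2).imp id pvMem_mono
        · rw [if_neg hxor]
          have heq : (pvEnc true u0 ∈ orig) ↔ (pvEnc false u0 ∈ orig) := by
            have hxe : PySem.Set.contains orig ("B-" ++ u0)
                = PySem.Set.contains orig ("I-" ++ u0) := by
              by_contra hne
              exact hxor (bne_iff_ne.mpr hne)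
            constructor
            · intro h
              exact (pvContains_iff orig ("I-" ++ u0)).mp
                (by rw [← hxe]; exact (pvContains_iff orig ("B-" ++ u0)).mpr h)
            · intro h
              exact (pvContains_iff orig ("B-" ++ u0)).mp
                (by rw [hxe]; exact (pvContains_iff orig ("I-" ++ u0)).mpr h)
          refine ih orig _ s hPre' hrest' ho hN2 h2' hc' ?_
          intro p hp
          rcases (PySem.Dict.mem_items_insert _ _ _ _).mp hp with rfl | ⟨hpd, -⟩
          · intro b2 hb2
            cases b2
            · exact Or.inl (heq.mpr hb2)
            · exact Or.inl (heq.mp hb2)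
          · exact hxall p hpd

-- ===== VERDICT (by name: the statement is the Claim_ definition above) =====
theorem ensure_bi_pairs_spec : Claim_equal_ensure_bi_pairs := by
  intro labels _ hpre
  unfold Spec_ensure_bi_pairs ensure_bi_pairs ensure_bi_pairs_alt
  exact pvMain labels (PySem.Set.ofList labels) PySem.Dict.empty (PySem.Set.ofList labels)
    (pvPre_cases hpre)
    (fun lb hlb => (PySem.Set.mem_ofList labels lb).mpr hlb)
    (fun y hy => hy)
    (by simp [PySem.Dict.empty, PySem.Dict.keys])
    (by simp [PySem.Dict.empty])
    (by
      intro b2 u hm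
      exact Or.inr ((PySem.Set.mem_ofList labels _).mp hm))
    (by simp [PySem.Dict.empty])
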